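-- pv_equiv track=rewrite | github.com/Mertokai/2015 | day1.py | day_one_second_star
-- ===== SOURCE A (Python) =====
-- def day_one_second_star(input_text):
--     counter = 0
--     position = 0
--     for ch in input_text:
--         position += 1
--         if ch == "(":
--             counter += 1
--         elif ch == ")":
--             counter -= 1
--         if counter == -1:
--             return position
-- ===== SOURCE B (Python) =====
-- def day_one_second_star(input_text):
--     weight = {"(": 1, ")": -1}
--     totals = []
--     t = 0
--     for ch in input_text:
--         t += weight.get(ch, 0)
--         totals.append(t)
--     for i, total in enumerate(totals, start=1):
--         if total == -1:
--             return i
-- ===== Notes on version B (the rewrite author's own statement) =====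
-- stated objective: alternative
-- what changed: B replaces A's single early-return loop over a branching counter with a prefix-sum decomposition: a weight table maps each char to +1/-1/0, one pass builds the running totals, and a second enumerate pass finds the first position whose total is -1.
import Mathlib
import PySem

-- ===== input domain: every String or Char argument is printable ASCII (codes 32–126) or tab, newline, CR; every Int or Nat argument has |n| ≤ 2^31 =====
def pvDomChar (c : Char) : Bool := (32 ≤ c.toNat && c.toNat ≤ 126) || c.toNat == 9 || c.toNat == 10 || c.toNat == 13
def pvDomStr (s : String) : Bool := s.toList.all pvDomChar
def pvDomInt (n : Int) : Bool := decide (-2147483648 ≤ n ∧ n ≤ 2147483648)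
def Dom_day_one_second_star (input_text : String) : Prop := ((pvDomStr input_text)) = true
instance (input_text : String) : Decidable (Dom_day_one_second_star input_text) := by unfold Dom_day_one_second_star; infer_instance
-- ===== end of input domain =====

-- B replaces A's single early-return loop with a weight table, a prefix-sum pass, and a search pass (objective: alternative decomposition, same O(n) cost).

-- ===== PORT A =====
def dayAGo : List Char → Int → Int → Option Int
  | [], _, _ => none
  | ch :: rest, counter, position =>
    let position' := position + 1
    let counter' := if ch = '(' then counter + 1 else if ch = ')' then counter - 1 else counter
    if counter' = -1 then some position' else dayAGo rest counter' position'

def day_one_second_star (input_text : String) : Option Int :=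
  dayAGo input_text.toList 0 0

-- ===== PORT B =====
-- weight = {"(": 1, ")": -1}
def bWeight : PySem.Dict Char Int := PySem.Dict.ofList [('(', 1), (')', -1)]

-- second loop: for i, total in enumerate(totals, start=1): if total == -1: return i
def bFind : List Int → Int → Option Int
  | [], _ => none
  | total :: rest, i => if total = -1 then some i else bFind rest (i + 1)

def day_one_second_star_alt (input_text : String) : Option Int :=
  -- first loop builds the prefix-sum list `totals`
  let acc := input_text.toList.foldl
    (fun (st : List Int × Int) ch =>
      let t := st.2 + PySem.Dict.getD bWeight ch 0
      (st.1 ++ [t], t)) ([], 0)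
  bFind acc.1 1

-- ===== PRECONDITION & SPEC =====
def Spec_day_one_second_star (input_text : String) (out : Option Int) : Prop := out = day_one_second_star_alt input_text
instance (input_text : String) (out : Option Int) : Decidable (Spec_day_one_second_star input_text out) := by unfold Spec_day_one_second_star; infer_instance

-- ===== CLAIM (what is proved, stated in full; the proofs are below) =====
def Claim_equal_day_one_second_star : Prop := ∀ (input_text : String), Dom_day_one_second_star input_text → Spec_day_one_second_star input_text (day_one_second_star input_text)

-- ===== LEMMAS AND PROOFS =====

-- the prefix-sum scan B's first loop computes, in recursive form
def bScan (t : Int) : List Char → List Int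
  | [] => []
  | ch :: rest => (t + PySem.Dict.getD bWeight ch 0) :: bScan (t + PySem.Dict.getD bWeight ch 0) rest

theorem bFold_eq_scan (l : List Char) (pre : List Int) (t : Int) :
    (l.foldl (fun (st : List Int × Int) ch =>
      let t := st.2 + PySem.Dict.getD bWeight ch 0
      (st.1 ++ [t], t)) (pre, t)) = (pre ++ bScan t l, t + (l.map (fun ch => PySem.Dict.getD bWeight ch 0)).sum) := by
  induction l generalizing pre t with
  | nil => simp [bScan]
  | cons ch rest ih =>
    simp only [List.foldl, bScan, ih, List.map, List.sum_cons]
    rw [Prod.mk.injEq]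
    constructor
    · simp
    · ring

theorem bWeight_eq (ch : Char) :
    PySem.Dict.getD bWeight ch 0 = (if ch = '(' then (1 : Int) else if ch = ')' then -1 else 0) := by
  have h : bWeight = PySem.Dict.mk [('(', 1), (')', -1)] := by decide
  by_cases e1 : ch = '('
  · subst e1; decide
  by_cases e2 : ch = ')'
  · subst e2; decide
  have b1 : ('(' == ch) = false := beq_eq_false_iff_ne.mpr (Ne.symm e1)
  have b2 : (')' == ch) = false := beq_eq_false_iff_ne.mpr (Ne.symm e2)
  rw [h, PySem.Dict.getD_eq_get?_getD, PySem.Dict.get?_mk_cons, PySem.Dict.get?_mk_cons, b1, b2]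
  simp [PySem.Dict.get?, List.find?, e1, e2]

theorem dayA_eq_find (l : List Char) (c p : Int) :
    dayAGo l c p = bFind (bScan c l) (p + 1) := by
  induction l generalizing c p with
  | nil => simp [dayAGo, bScan, bFind]
  | cons ch rest ih =>
    simp only [dayAGo, bScan, bFind, bWeight_eq]
    have hw : c + (if ch = '(' then (1 : Int) else if ch = ')' then -1 else 0)
        = (if ch = '(' then c + 1 else if ch = ')' then c - 1 else c) := by
      split_ifs <;> ring
    rw [hw]
    rcases eq_or_ne (if ch = '(' then c + 1 else if ch = ')' then c - 1 else c) (-1) with hneg | hneg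
    · rw [if_pos hneg, if_pos hneg]
    · rw [if_neg hneg, if_neg hneg]
      exact ih _ _

-- ===== VERDICT (by name: the statement is the Claim_ definition above) =====
theorem day_one_second_star_spec : Claim_equal_day_one_second_star := by
  intro s _
  unfold Spec_day_one_second_star day_one_second_star day_one_second_star_alt
  rw [bFold_eq_scan]
  simpa using dayA_eq_find s.toList 0 0
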